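-- pv_equiv track=rewrite | github.com/MrBrantCode/unitest_baseline | mut_generate/mist_train_cf/cf_55855/solution.py | validate_and_xor_alternating_subseq
-- ===== SOURCE A (Python) =====
-- def validate_and_xor_alternating_subseq(a: str, b: str) -> str:
--     if len(a) != len(b):
--         return "Error: Strings are of different lengths."
--
--     xor_result = "".join(str(int(a[i]) ^ int(b[i])) for i in range(len(a)))
--
--     longest_alt_subseq = ""
--     curr_alt_subseq = xor_result[0]
--     for bit in xor_result[1:]:
--         if bit != curr_alt_subseq[-1]:
--             curr_alt_subseq += bit
--         else:
--             longest_alt_subseq = max(longest_alt_subseq, curr_alt_subseq, key=len)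
--             curr_alt_subseq = bit
--     return max(longest_alt_subseq, curr_alt_subseq, key=len)
-- ===== SOURCE B (Python) =====
-- def validate_and_xor_alternating_subseq(a: str, b: str) -> str:
--     if len(a) != len(b):
--         return "Error: Strings are of different lengths."
--
--     xor_result = "".join(str(int(a[i]) ^ int(b[i])) for i in range(len(a)))
--
--     # index/length pass: track start of the current alternating run and the
--     # (start, length) of the best run; strict '>' keeps the earliest best run.
--     best_start = 0
--     best_len = 0
--     cur_start = 0
--     prev = None
--     for i, ch in enumerate(xor_result):
--         if ch == prev:
--             cur_start = i
--         cur_len = i - cur_start + 1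
--         if cur_len > best_len:
--             best_start, best_len = cur_start, cur_len
--         prev = ch
--     return xor_result[best_start:best_start + best_len]
-- ===== Notes on version B (the rewrite author's own statement) =====
-- stated objective: alternative
-- what changed: Replaces the run-growing string accumulation with max(...,key=len) by a single index/length pass that tracks (start,length) of the current and best alternating runs and returns one final slice; the XOR join is kept.
import Mathlib
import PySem

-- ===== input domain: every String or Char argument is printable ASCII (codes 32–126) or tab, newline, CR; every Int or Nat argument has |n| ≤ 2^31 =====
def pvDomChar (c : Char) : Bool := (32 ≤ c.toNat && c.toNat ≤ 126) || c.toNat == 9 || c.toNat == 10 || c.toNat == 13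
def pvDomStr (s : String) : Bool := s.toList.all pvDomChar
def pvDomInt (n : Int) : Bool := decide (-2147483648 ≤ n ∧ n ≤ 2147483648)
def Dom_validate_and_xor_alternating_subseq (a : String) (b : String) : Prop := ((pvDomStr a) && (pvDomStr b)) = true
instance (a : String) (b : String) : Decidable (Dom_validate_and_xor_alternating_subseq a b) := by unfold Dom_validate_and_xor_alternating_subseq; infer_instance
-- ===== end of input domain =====

-- B replaces A's run-growing string accumulation (max(...,key=len)) by one index/length
-- pass returning a single final slice; same XOR join, same cost class (objective: alternative).

-- ===== PORT A =====
-- max(l, c, key=len): returns c iff len(c) > len(l), else the first argument l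
def pvMaxLen (l c : List Char) : List Char := if c.length > l.length then c else l

-- int(s) for a one-char string; Pre_ guarantees the char is a digit, so ofChars? is some
def pvDigit (cs : List Char) : Int := (PySem.Int.ofChars? cs).getD 0

-- "".join(str(int(a[i]) ^ int(b[i])) for i in range(len(a)))  (shared verbatim by A and B)
def pvXorChars (la lb : List Char) : List Char :=
  ((PySem.List.pyRange 0 (la.length : Int) 1).map (fun i =>
    PySem.Int.toChars (PySem.Int.bxor (pvDigit [PySem.List.pyGetD la i ' '])
                                      (pvDigit [PySem.List.pyGetD lb i ' '])))).flatten

-- the for-loop over xor_result[1:] with state (longest_alt_subseq, curr_alt_subseq)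
def pvLoopA : List Char → List Char → List Char → List Char
  | [], longest, curr => pvMaxLen longest curr
  | bit :: rest, longest, curr =>
    if bit ≠ curr.getLastD ' ' then pvLoopA rest longest (curr ++ [bit])
    else pvLoopA rest (pvMaxLen longest curr) [bit]

def validate_and_xor_alternating_subseq (a : String) (b : String) : String :=
  if PySem.Str.len a ≠ PySem.Str.len b then "Error: Strings are of different lengths."
  else
    match pvXorChars a.toList b.toList with
    | [] => ""   -- xor_result[0] raises IndexError in Python; excluded by Pre_
    | x :: rest => String.ofList (pvLoopA rest [] [x])

-- ===== PORT B =====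
-- one enumerate step of Source B's loop: state st = (best_start, best_len, cur_start, prev), p = (i, ch)
def pvStepB (st : Int × Int × Int × Option Char) (p : Int × Char) : Int × Int × Int × Option Char :=
  let cS := if some p.2 = st.2.2.2 then p.1 else st.2.2.1
  let cL := p.1 - cS + 1
  if cL > st.2.1 then (cS, cL, cS, some p.2) else (st.1, st.2.1, cS, some p.2)

def validate_and_xor_alternating_subseq_alt (a : String) (b : String) : String :=
  if PySem.Str.len a ≠ PySem.Str.len b then "Error: Strings are of different lengths."
  else
    let xs := pvXorChars a.toList b.toList
    let st := (PySem.List.enumerate xs 0).foldl pvStepB (0, 0, 0, none)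
    String.ofList (PySem.List.slice xs (some st.1) (some (st.1 + st.2.1)))

-- ===== PRECONDITION & SPEC =====
-- Pre_ excludes exactly the equal-length inputs on which Python A raises: the empty pair
-- (IndexError at xor_result[0]) and pairs with a non-digit character (ValueError in int()).
def pvIsDigit (c : Char) : Bool := 48 ≤ c.toNat && c.toNat ≤ 57

def Pre_validate_and_xor_alternating_subseq (a : String) (b : String) : Prop :=
  PySem.Str.len a = PySem.Str.len b →
    (a.toList ≠ [] ∧ a.toList.all pvIsDigit = true ∧ b.toList.all pvIsDigit = true)
instance (a : String) (b : String) : Decidable (Pre_validate_and_xor_alternating_subseq a b) := by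
  unfold Pre_validate_and_xor_alternating_subseq; infer_instance

def pvWitness_validate_and_xor_alternating_subseq : String × String := ("1", "0")

def Spec_validate_and_xor_alternating_subseq (a : String) (b : String) (out : String) : Prop := out = validate_and_xor_alternating_subseq_alt a b
instance (a : String) (b : String) (out : String) : Decidable (Spec_validate_and_xor_alternating_subseq a b out) := by unfold Spec_validate_and_xor_alternating_subseq; infer_instance

-- ===== CLAIM (what is proved, stated in full; the proofs are below) =====
def Claim_equal_validate_and_xor_alternating_subseq : Prop := ∀ (a : String) (b : String), Dom_validate_and_xor_alternating_subseq a b → Pre_validate_and_xor_alternating_subseq a b → Spec_validate_and_xor_alternating_subseq a b (validate_and_xor_alternating_subseq a b)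

-- ===== LEMMAS AND PROOFS =====

lemma pvToDigitsCore_len (b : Nat) : ∀ (f n : Nat) (acc : List Char),
    acc.length ≤ (Nat.toDigitsCore b f n acc).length := by
  intro f
  induction f with
  | zero => intro n acc; simp [Nat.toDigitsCore]
  | succ f ih =>
    intro n acc
    simp only [Nat.toDigitsCore]
    split
    · simp
    · exact le_trans (by simp) (ih _ _)

lemma pvToDigits_ne_nil (b n : Nat) : Nat.toDigits b n ≠ [] := by
  unfold Nat.toDigits
  simp only [Nat.toDigitsCore]
  split
  · simp
  · intro h
    have := pvToDigitsCore_len b n (n / b) [Nat.digitChar (n % b)]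
    rw [h] at this
    simp at this

lemma pvToChars_ne_nil (n : Int) : PySem.Int.toChars n ≠ [] := by
  unfold PySem.Int.toChars
  split
  · simp
  · exact pvToDigits_ne_nil 10 n.toNat

lemma pvXorChars_ne_nil (la lb : List Char) (h : la ≠ []) : pvXorChars la lb ≠ [] := by
  unfold pvXorChars
  have hlen : (0 : Int) < (la.length : Int) := by
    have : 0 < la.length := List.length_pos_of_ne_nil h
    exact_mod_cast this
  rw [PySem.List.pyRange_one_cons hlen]
  simp only [List.map_cons, List.flatten_cons]
  intro hcontra
  rcases List.append_eq_nil_iff.mp hcontra with ⟨h1, _⟩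
  exact pvToChars_ne_nil _ h1

-- a drop/take window lying inside p is unchanged by appending to p
lemma pvWindow_append {p q : List Char} {bS bL : Nat} (h : bS + bL ≤ p.length) :
    ((p ++ q).drop bS).take bL = (p.drop bS).take bL := by
  rw [List.drop_append_of_le_length (by omega), List.take_append_of_le_length (by simp; omega)]

lemma pvMaxLen_len_ge_right (l c : List Char) : c.length ≤ (pvMaxLen l c).length := by
  unfold pvMaxLen; split <;> omega

lemma pvMaxLen_len_ge_left (l c : List Char) : l.length ≤ (pvMaxLen l c).length := by
  unfold pvMaxLen; split <;> omega

-- main loop correspondence: A's (longest, curr) state versus B's (best_start, best_len,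
-- cur_start, prev) state, both having consumed the prefix p of the xor string
lemma pvLoop_eq (rest : List Char) :
    ∀ (p longest curr : List Char) (bS bL : Nat) (lastc : Char),
    curr ≠ [] →
    curr.length ≤ p.length →
    curr = p.drop (p.length - curr.length) →
    curr.getLast? = some lastc →
    pvMaxLen longest curr = (p.drop bS).take bL →
    bL = (pvMaxLen longest curr).length →
    bS + bL ≤ p.length →
    pvLoopA rest longest curr =
      (let st := (PySem.List.enumerate rest (p.length : Int)).foldl pvStepB
          ((bS : Int), (bL : Int), ((p.length - curr.length : Nat) : Int), some lastc);
       PySem.List.slice (p ++ rest) (some st.1) (some (st.1 + st.2.1))) := by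
  induction rest with
  | nil =>
    intro p longest curr bS bL lastc hne hle hsuf hlast hwin hbL hbnd
    simp only [PySem.List.enumerate_nil, List.foldl_nil, List.append_nil, pvLoopA]
    rw [PySem.List.slice_natCast_add p bS bL, hwin]
  | cons bit r ih =>
    intro p longest curr bS bL lastc hne hle hsuf hlast hwin hbL hbnd
    have hcurrpos : 0 < curr.length := List.length_pos_of_ne_nil hne
    have hbLpos : 1 ≤ bL := by have := pvMaxLen_len_ge_right longest curr; omega
    rw [PySem.List.enumerate_cons]
    simp only [List.foldl_cons]
    have hgetD : curr.getLastD ' ' = lastc := by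
      rw [List.getLastD_eq_getLast?, hlast]; rfl
    have e1 : (p.length : Int) + 1 = ((p.length + 1 : Nat) : Int) := by omega
    by_cases hbe : bit = lastc
    · -- run breaks: A resets curr, B resets cur_start; the best window is unchanged
      subst hbe
      have hstep : pvStepB ((bS : Int), (bL : Int), ((p.length - curr.length : Nat) : Int), some bit)
          ((p.length : Int), bit) = ((bS : Int), (bL : Int), (p.length : Int), some bit) := by
        simp only [pvStepB, if_true]
        rw [if_neg (by omega)]
      rw [hstep]
      simp only [pvLoopA, hgetD, ne_eq, not_true_eq_false, if_false]
      have hmax : pvMaxLen (pvMaxLen longest curr) [bit] = pvMaxLen longest curr := by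
        have h1 : ¬ (([bit] : List Char).length > (pvMaxLen longest curr).length) := by
          simp only [List.length_cons, List.length_nil]; omega
        conv_lhs => rw [pvMaxLen]
        rw [if_neg h1]
      have key := ih (p ++ [bit]) (pvMaxLen longest curr) [bit] bS bL bit
        (by simp) (by simp)
        (by simp)
        (by simp)
        (by rw [hmax, hwin, pvWindow_append hbnd])
        (by rw [hmax, hbL])
        (by simp; omega)
      simp only [List.length_append, List.length_cons, List.length_nil, Nat.zero_add,
        Nat.add_sub_cancel] at key
      rw [e1, key]
      simp [List.append_assoc]
    · -- run continues: A appends bit to curr; B extends the current run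
      simp only [pvLoopA, hgetD, hbe, ne_eq, not_false_eq_true, if_true]
      have hcast : ((p.length - curr.length : Nat) : Int) = (p.length : Int) - (curr.length : Int) := by
        push_cast [hle]; ring
      have hsuf' : curr ++ [bit] = (p ++ [bit]).drop (p.length - curr.length) := by
        rw [List.drop_append_of_le_length (by omega), ← hsuf]
      have hcL : (p.length : Int) - ((p.length - curr.length : Nat) : Int) + 1
          = ((curr.length + 1 : Nat) : Int) := by rw [hcast]; push_cast; ring
      have hc2 : p.length + 1 - (curr.length + 1) = p.length - curr.length := by omega
      by_cases hcmp : curr.length + 1 > bL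
      · -- the extended current run becomes the new best
        have hstep : pvStepB ((bS : Int), (bL : Int), ((p.length - curr.length : Nat) : Int), some lastc)
            ((p.length : Int), bit) =
            (((p.length - curr.length : Nat) : Int), ((curr.length + 1 : Nat) : Int),
             ((p.length - curr.length : Nat) : Int), some bit) := by
          simp only [pvStepB, Option.some.injEq, hbe, ite_false]
          rw [hcL, if_pos (show ((curr.length + 1 : Nat) : Int) > (bL : Int) by exact_mod_cast hcmp)]
        rw [hstep]
        have hlongle : longest.length ≤ bL := by
          have := pvMaxLen_len_ge_left longest curr; omega
        have hwin' : pvMaxLen longest (curr ++ [bit]) = curr ++ [bit] := by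
          rw [pvMaxLen, if_pos (by simp; omega)]
        have key := ih (p ++ [bit]) longest (curr ++ [bit]) (p.length - curr.length) (curr.length + 1) bit
          (by simp) (by simp; omega)
          (by rw [show (p ++ [bit]).length - (curr ++ [bit]).length = p.length - curr.length by simp only [List.length_append, List.length_cons, List.length_nil]; omega]; exact hsuf')
          (List.getLast?_concat)
          (by rw [hwin', ← hsuf']; simp)
          (by rw [hwin']; simp)
          (by simp; omega)
        simp only [List.length_append, List.length_cons, List.length_nil, Nat.zero_add] at key
        rw [hc2] at key
        rw [e1, key]
        simp [List.append_assoc]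
      · -- the old best is at least as long: best unchanged
        have hstep : pvStepB ((bS : Int), (bL : Int), ((p.length - curr.length : Nat) : Int), some lastc)
            ((p.length : Int), bit) =
            ((bS : Int), (bL : Int), ((p.length - curr.length : Nat) : Int), some bit) := by
          simp only [pvStepB, Option.some.injEq, hbe, ite_false]
          rw [hcL, if_neg (show ¬ ((curr.length + 1 : Nat) : Int) > (bL : Int) by exact_mod_cast hcmp)]
        rw [hstep]
        have hcurrlt : curr.length ≤ longest.length := by
          rcases Nat.lt_or_ge longest.length curr.length with h | h
          · exfalso
            have hx : pvMaxLen longest curr = curr := by rw [pvMaxLen, if_pos (by omega)]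
            rw [hx] at hbL; omega
          · omega
        have hPMc : pvMaxLen longest curr = longest := by
          rw [pvMaxLen, if_neg (by omega)]
        have hbLl : bL = longest.length := by rw [hPMc] at hbL; exact hbL
        have hwin' : pvMaxLen longest (curr ++ [bit]) = longest := by
          rw [pvMaxLen, if_neg (by simp; omega)]
        have key := ih (p ++ [bit]) longest (curr ++ [bit]) bS bL bit
          (by simp) (by simp; omega)
          (by rw [show (p ++ [bit]).length - (curr ++ [bit]).length = p.length - curr.length by simp only [List.length_append, List.length_cons, List.length_nil]; omega]; exact hsuf')
          (List.getLast?_concat)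
          (by rw [hwin', ← hPMc, hwin, pvWindow_append hbnd])
          (by rw [hwin', hbLl])
          (by simp; omega)
        simp only [List.length_append, List.length_cons, List.length_nil, Nat.zero_add] at key
        rw [hc2] at key
        rw [e1, key]
        simp [List.append_assoc]

-- evaluating the first loop iteration of B on (0, x)
lemma pvStepB_init (x : Char) :
    pvStepB (0, 0, 0, none) (0, x) = (0, 1, 0, some x) := by
  simp [pvStepB]

-- ===== VERDICT (by name: the statement is the Claim_ definition above) =====
theorem validate_and_xor_alternating_subseq_spec : Claim_equal_validate_and_xor_alternating_subseq := by
  intro a b _ hpre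
  unfold Spec_validate_and_xor_alternating_subseq
  unfold validate_and_xor_alternating_subseq validate_and_xor_alternating_subseq_alt
  by_cases hlen : PySem.Str.len a = PySem.Str.len b
  · rw [if_neg (fun h => h hlen), if_neg (fun h => h hlen)]
    obtain ⟨hne, -, -⟩ := hpre hlen
    have hxs := pvXorChars_ne_nil a.toList b.toList hne
    cases hxseq : pvXorChars a.toList b.toList with
    | nil => exact absurd hxseq hxs
    | cons x rest =>
      simp only [PySem.List.enumerate_cons, List.foldl_cons, pvStepB_init]
      have key := pvLoop_eq rest [x] [] [x] 0 1 x (by simp) (by simp) (by simp) (by simp)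
        (by simp [pvMaxLen]) (by simp [pvMaxLen]) (by simp)
      simp only [List.length_cons, List.length_nil, Nat.zero_add, Nat.sub_self,
        Nat.cast_zero, Nat.cast_one, List.singleton_append] at key
      simp only [zero_add]
      rw [key]
  · rw [if_pos hlen, if_pos hlen]
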